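-- pv_equiv track=rewrite | github.com/SergeyZ06/GB_Basics_of_Python | 4th hometask/7th task.py | func_gen
-- ===== SOURCE A (Python) =====
-- from functools import reduce
--
-- def func_gen(arg_1):
--     # Функция вычисления произведения двух аргументов
--     def func_multiply(func_multiply_arg_1, func_multiply_arg_2):
--         return func_multiply_arg_1 * func_multiply_arg_2
--
--     # Список элементов от 1 до заданного числа, для которых необходимо вычислить фактоиалы
--     list_1 = list(i1 for i1 in range(1, arg_1 + 1))
--     # Пустой список, в котором будут храниться вычисленные факториалы
--     list_2 = list()
--     # Пустой список, в котором будут храниться промежуточные вычисления фактриалов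
--     list_3 = list()
--
--     # Для каждого элемента в списке list_1 - список чисел от 1 до заданного числа с шагом 1
--     for i2 in list_1:
--         # Добавить в список list_3 элемент списка list_1, для промежуточного вычисления факториала
--         # от 1 до текущего элемента
--         list_3.append(i2)
--         # Добавить в список list_2 вычисленный факториал, произведение всех элементов списка list_3
--         # от 1 до текущего элемента
--         list_2.append(reduce(func_multiply, list_3))
--
--     # Возврат итерируемого элемента генератора
--     # Все вычисленные факториалы хранятся в списке list_2
--     for i3 in list_2:
--         yield i3
-- ===== SOURCE B (Python) =====
-- def func_gen(arg_1):
--     # Running product: each factorial from the previous one (O(n) multiplications).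
--     product = 1
--     for i in range(1, arg_1 + 1):
--         product *= i
--         yield product
-- ===== Notes on version B (the rewrite author's own statement) =====
-- stated objective: faster
-- what changed: B keeps a running product and multiplies it by the next index each step, instead of re-reducing the whole growing prefix list for every element.
import Mathlib
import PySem

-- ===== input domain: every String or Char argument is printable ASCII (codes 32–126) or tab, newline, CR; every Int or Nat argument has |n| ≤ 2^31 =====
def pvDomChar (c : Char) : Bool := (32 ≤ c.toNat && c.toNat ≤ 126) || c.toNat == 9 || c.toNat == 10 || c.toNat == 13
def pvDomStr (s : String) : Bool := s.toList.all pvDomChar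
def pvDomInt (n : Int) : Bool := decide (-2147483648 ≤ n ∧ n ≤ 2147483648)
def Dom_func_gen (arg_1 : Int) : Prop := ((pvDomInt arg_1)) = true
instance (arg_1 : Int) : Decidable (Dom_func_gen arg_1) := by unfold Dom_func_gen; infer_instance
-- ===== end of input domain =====

-- B replaces A's re-reduction of the whole growing prefix at every step by a single
-- running product that is multiplied by the next index (O(n) vs O(n^2) multiplications).

-- ===== PORT A =====
-- reduce(func_multiply, xs) on a NONEMPTY list: first element is the initial accumulator.
-- (list_3 is always nonempty when A calls reduce, so the [] case is unreachable; 0 is a dummy.)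
def pvReduceMul : List Int → Int
  | [] => 0
  | x :: xs => xs.foldl (fun a b => a * b) x

-- the for-loop over list_1, carrying (list_2, list_3)
def pvALoop : List Int → List Int × List Int → List Int × List Int
  | [], st => st
  | i2 :: rest, (l2, l3) =>
      pvALoop rest (l2 ++ [pvReduceMul (l3 ++ [i2])], l3 ++ [i2])

def func_gen (arg_1 : Int) : List Int :=
  let list_1 := PySem.List.pyRange 1 (arg_1 + 1) 1
  (pvALoop list_1 ([], [])).1

-- ===== PORT B =====
-- running product, yielding each new value
def pvBLoop : List Int → Int → List Int
  | [], _ => []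
  | i :: rest, p => (p * i) :: pvBLoop rest (p * i)

def func_gen_alt (arg_1 : Int) : List Int :=
  pvBLoop (PySem.List.pyRange 1 (arg_1 + 1) 1) 1

-- ===== PRECONDITION & SPEC =====
def Spec_func_gen (arg_1 : Int) (out : List Int) : Prop := out = func_gen_alt arg_1
instance (arg_1 : Int) (out : List Int) : Decidable (Spec_func_gen arg_1 out) := by unfold Spec_func_gen; infer_instance

-- ===== CLAIM (what is proved, stated in full; the proofs are below) =====
def Claim_equal_func_gen : Prop := ∀ (arg_1 : Int), Dom_func_gen arg_1 → Spec_func_gen arg_1 (func_gen arg_1)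

-- ===== LEMMAS AND PROOFS =====

theorem pvReduceMul_append (l : List Int) (i : Int) (h : l ≠ []) :
    pvReduceMul (l ++ [i]) = pvReduceMul l * i := by
  cases l with
  | nil => exact absurd rfl h
  | cons x xs => simp [pvReduceMul, List.foldl_append]

-- loop invariant: if l3 is nonempty with product p (or l3 = [] and p = 1),
-- A's loop appends exactly B's running-product trace to l2.
theorem pvALoop_inv (l : List Int) :
    ∀ (l2 l3 : List Int) (p : Int),
      (l3 = [] ∧ p = 1 ∨ l3 ≠ [] ∧ pvReduceMul l3 = p) →
      (pvALoop l (l2, l3)).1 = l2 ++ pvBLoop l p := by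
  induction l with
  | nil => intro l2 l3 p _; simp [pvALoop, pvBLoop]
  | cons i rest ih =>
      intro l2 l3 p hp
      have hred : pvReduceMul (l3 ++ [i]) = p * i := by
        rcases hp with ⟨h0, h1⟩ | ⟨hne, hpr⟩
        · subst h0 h1; simp [pvReduceMul]
        · rw [pvReduceMul_append l3 i hne, hpr]
      have hrec := ih (l2 ++ [pvReduceMul (l3 ++ [i])]) (l3 ++ [i]) (p * i)
        (Or.inr ⟨by simp, hred⟩)
      simp only [pvALoop]
      rw [hrec, hred]
      simp [pvBLoop]

-- ===== VERDICT (by name: the statement is the Claim_ definition above) =====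
theorem func_gen_spec : Claim_equal_func_gen := by
  intro arg_1 _
  unfold Spec_func_gen func_gen func_gen_alt
  simpa using pvALoop_inv (PySem.List.pyRange 1 (arg_1 + 1) 1) [] [] 1 (Or.inl ⟨rfl, rfl⟩)
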